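-- pv_equiv track=rewrite | github.com/SamuelHill/lambda-calc | lambda2.py | process_application
-- ===== SOURCE A (Python) =====
-- def process_application(string: str) -> str:
--     arg_list = []
--     substitution = ''
--     continuous = False
--     for char in string:
--         if char.isspace():
--             continue
--         if char.isupper():
--             substitution = char if not continuous else substitution + char
--             continuous = True
--         else:
--             if continuous:
--                 arg_list.append(substitution)
--                 substitution = ''
--                 continuous = False
--             else:
--                 arg_list.append(char)
--     # first, rest = (lambda x, *y: (x, y))(*arg_list)
--     first, *rest = arg_list
--     return first + "".join([f'({arg})' for arg in rest])
-- ===== SOURCE B (Python) =====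
-- def process_application(string: str) -> str:
--     # Tokenize the whitespace-stripped string by scanning runs with an index:
--     # an uppercase run terminated by some character becomes one token (the
--     # terminating character is consumed); a run at the end of the string yields
--     # no token; any other character is its own token.
--     s = ''.join(c for c in string if not c.isspace())
--     tokens = []
--     i, n = 0, len(s)
--     while i < n:
--         if s[i].isupper():
--             j = i + 1
--             while j < n and s[j].isupper():
--                 j += 1
--             if j < n:
--                 tokens.append(s[i:j])
--             i = j + 1
--         else:
--             tokens.append(s[i])
--             i += 1
--     first, *rest = tokens
--     return first + ''.join(f'({a})' for a in rest)
-- ===== Notes on version B (the rewrite author's own statement) =====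
-- stated objective: alternative
-- what changed: Replaces A's per-character state machine (continuous flag + growing accumulator, whitespace skipped inline) with a two-level index scan over the pre-stripped string that takes each uppercase run (with its terminating character) or single character as a token in one step.
-- outside the precondition, e.g. on process_application('AB'): A raises ValueError, B raises ValueError; on process_application('  '): A raises ValueError, B raises ValueError
import Mathlib
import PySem

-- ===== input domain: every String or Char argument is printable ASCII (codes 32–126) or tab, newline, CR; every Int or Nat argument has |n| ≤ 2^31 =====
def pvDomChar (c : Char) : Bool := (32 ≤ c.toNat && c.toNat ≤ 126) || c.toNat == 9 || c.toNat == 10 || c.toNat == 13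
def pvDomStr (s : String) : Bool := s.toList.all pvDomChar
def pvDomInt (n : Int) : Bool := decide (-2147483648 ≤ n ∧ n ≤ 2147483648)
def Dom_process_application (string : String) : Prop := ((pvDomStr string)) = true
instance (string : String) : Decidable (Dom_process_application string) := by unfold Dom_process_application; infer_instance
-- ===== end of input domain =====

-- ===== PORT A =====
-- B re-tokenizes by scanning uppercase runs with indices instead of A's per-character
-- flag/accumulator state machine; same return value, no speed claim (objective: alternative).
-- Strings are carried as List Char inside both ports (String ↔ List Char bridge).

-- one iteration of A's for-loop: state = (arg_list, substitution, continuous)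
def pvStepA (st : List (List Char) × List Char × Bool) (c : Char) :
    List (List Char) × List Char × Bool :=
  if PySem.Chars.isspace c then st
  else if PySem.Chars.isupper c then
    (st.1, (if st.2.2 = false then [c] else st.2.1 ++ [c]), true)
  else
    if st.2.2 = true then (st.1 ++ [st.2.1], [], false)
    else (st.1 ++ [[c]], st.2.1, st.2.2)

def process_application (string : String) : String :=
  let st := string.toList.foldl pvStepA ([], [], false)
  -- `first, *rest = arg_list` raises ValueError on []; excluded by Pre_, port returns ""
  match st.1 with
  | [] => ""
  | first :: rest => String.mk (first ++ (rest.map (fun arg => '(' :: (arg ++ [')']))).flatten)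

-- ===== PORT B =====
-- tokenizer over the stripped character list: an uppercase run with a terminator is one
-- token (terminator consumed); a trailing run yields no token; other chars are tokens.
def pvTokensB : List Char → List (List Char)
  | [] => []
  | c :: cs =>
    if PySem.Chars.isupper c then
      match h : cs.dropWhile PySem.Chars.isupper with
      | [] => []
      | _ :: rest => (c :: cs.takeWhile PySem.Chars.isupper) :: pvTokensB rest
    else [c] :: pvTokensB cs
termination_by l => l.length
decreasing_by
  · have h1 : (cs.dropWhile PySem.Chars.isupper).length ≤ cs.length :=
      cs.length_dropWhile_le PySem.Chars.isupper
    rw [h] at h1; simp at h1 ⊢; omega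
  · simp

def process_application_alt (string : String) : String :=
  let s := string.toList.filter (fun c => !PySem.Chars.isspace c)
  match pvTokensB s with
  | [] => ""
  | first :: rest => String.mk (first ++ (rest.map (fun a => '(' :: (a ++ [')']))).flatten)

-- ===== PRECONDITION & SPEC =====
-- Pre_ excludes exactly the inputs on which A raises ValueError at `first, *rest = arg_list`:
-- strings whose non-whitespace characters are all uppercase (possibly none), i.e. no token
-- is ever appended.
def Pre_process_application (string : String) : Prop :=
  string.toList.any (fun c => !PySem.Chars.isspace c && !PySem.Chars.isupper c) = true
instance (string : String) : Decidable (Pre_process_application string) := by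
  unfold Pre_process_application; infer_instance

def pvWitness_process_application : String := "xYz"

def Spec_process_application (string : String) (out : String) : Prop := out = process_application_alt string
instance (string : String) (out : String) : Decidable (Spec_process_application string out) := by unfold Spec_process_application; infer_instance

-- ===== CLAIM (what is proved, stated in full; the proofs are below) =====
def Claim_equal_process_application : Prop := ∀ (string : String), Dom_process_application string → Pre_process_application string → Spec_process_application string (process_application string)

-- ===== LEMMAS AND PROOFS =====

-- continuation form of B's tokenizer: state "inside an uppercase run with accumulator sub"
def pvContB (sub : List Char) (t : List Char) : List (List Char) :=
  match t.dropWhile PySem.Chars.isupper with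
  | [] => []
  | _ :: rest => (sub ++ t.takeWhile PySem.Chars.isupper) :: pvTokensB rest

-- A's loop ignores whitespace characters entirely
lemma pvStepA_space (st : List (List Char) × List Char × Bool) (c : Char)
    (h : PySem.Chars.isspace c = true) : pvStepA st c = st := by
  simp [pvStepA, h]

lemma pvFoldA_filter (l : List Char) (st : List (List Char) × List Char × Bool) :
    l.foldl pvStepA st = (l.filter (fun c => !PySem.Chars.isspace c)).foldl pvStepA st := by
  induction l generalizing st with
  | nil => rfl
  | cons c cs ih =>
    by_cases h : PySem.Chars.isspace c = true
    · simp [List.filter_cons, h, pvStepA_space _ _ h, ih]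
    · simp only [Bool.not_eq_true] at h
      simp [List.filter_cons, h, ih]

-- main invariant: A's machine over a space-free list produces B's token list
lemma pvMain (n : ℕ) : ∀ (t : List Char), t.length ≤ n →
    (∀ c ∈ t, PySem.Chars.isspace c = false) →
    ∀ (acc : List (List Char)) (sub : List Char) (cont : Bool),
    (t.foldl pvStepA (acc, sub, cont)).1
      = acc ++ (if cont then pvContB sub t else pvTokensB t) := by
  induction n with
  | zero =>
    intro t ht _ acc sub cont
    interval_cases h : t.length
    rw [List.length_eq_zero_iff] at h
    subst h
    cases cont <;> simp [pvContB, pvTokensB]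
  | succ n ih =>
    intro t ht hsp acc sub cont
    cases t with
    | nil => cases cont <;> simp [pvContB, pvTokensB]
    | cons c cs =>
      have hc : PySem.Chars.isspace c = false := hsp c (by simp)
      have hcs : ∀ x ∈ cs, PySem.Chars.isspace x = false := fun x hx => hsp x (by simp [hx])
      have hlen : cs.length ≤ n := by simpa using ht
      by_cases hu : PySem.Chars.isupper c = true
      · cases cont with
        | false =>
          have hstep : pvStepA (acc, sub, false) c = (acc, [c], true) := by
            simp [pvStepA, hc, hu]
          rw [List.foldl_cons, hstep, ih cs hlen hcs acc [c] true]
          simp only [if_pos rfl, if_neg (by simp : ¬ (false = true))]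
          rw [pvTokensB]
          simp only [hu, if_pos rfl]
          rw [pvContB]
          cases h : cs.dropWhile PySem.Chars.isupper <;> simp [h]
        | true =>
          have hstep : pvStepA (acc, sub, true) c = (acc, sub ++ [c], true) := by
            simp [pvStepA, hc, hu]
          rw [List.foldl_cons, hstep, ih cs hlen hcs acc (sub ++ [c]) true]
          simp only [if_pos rfl]
          rw [pvContB, pvContB]
          rw [List.dropWhile_cons_of_pos hu, List.takeWhile_cons_of_pos hu]
          cases h : cs.dropWhile PySem.Chars.isupper <;> simp [h]
      · simp only [Bool.not_eq_true] at hu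
        cases cont with
        | false =>
          have hstep : pvStepA (acc, sub, false) c = (acc ++ [[c]], sub, false) := by
            simp [pvStepA, hc, hu]
          rw [List.foldl_cons, hstep, ih cs hlen hcs (acc ++ [[c]]) sub false]
          rw [pvTokensB]
          simp [hu]
        | true =>
          have hstep : pvStepA (acc, sub, true) c = (acc ++ [sub], [], false) := by
            simp [pvStepA, hc, hu]
          rw [List.foldl_cons, hstep, ih cs hlen hcs (acc ++ [sub]) [] false]
          have hcont : pvContB sub (c :: cs) = sub :: pvTokensB cs := by
            rw [pvContB, List.dropWhile_cons_of_neg (by simp [hu])]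
            simp [List.takeWhile_cons, hu]
          simp [hcont]

lemma pvTokens_eq (string : String) :
    (string.toList.foldl pvStepA ([], [], false)).1
      = pvTokensB (string.toList.filter (fun c => !PySem.Chars.isspace c)) := by
  rw [pvFoldA_filter]
  have := pvMain (string.toList.filter (fun c => !PySem.Chars.isspace c)).length
    (string.toList.filter (fun c => !PySem.Chars.isspace c)) le_rfl
    (by intro c hc; have := List.of_mem_filter hc; simpa using this) [] [] false
  simpa using this

-- ===== VERDICT (by name: the statement is the Claim_ definition above) =====
theorem process_application_spec : Claim_equal_process_application := by
  intro string _ _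
  unfold Spec_process_application process_application process_application_alt
  simp only [pvTokens_eq]
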